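-- pv_equiv track=rewrite | github.com/Nachiket-Jamadar/flames_nrj | flames_nrj/flames_functions.py | cancel_and_count
-- ===== SOURCE A (Python) =====
-- def cancel_and_count(n1, n2):
--     n1, n2 = list(n1.lower()), list(n2.lower())
--     if len(n2) > len(n1):
--         n1, n2 = n2, n1
--
--     for i in range(len(n1)):
--         if n1[i] in n2 and n1[i] != 0:
--             name_2_replace_index = n2.index(n1[i])
--             n1[i], n2[name_2_replace_index] = 0, 0
--     while 0 in n1: n1.remove(0)
--     while 0 in n2: n2.remove(0)
--
--     return len(n1)+len(n2)
-- ===== SOURCE B (Python) =====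
-- def cancel_and_count(n1, n2):
--     a, b = list(n1.lower()), list(n2.lower())
--     common = sum(min(a.count(c), b.count(c)) for c in set(a))
--     return len(a) + len(b) - 2 * common
-- ===== Notes on version B (the rewrite author's own statement) =====
-- stated objective: faster
-- what changed: A's per-letter cancellation loop with repeated list membership tests, .index scans and while/remove passes is replaced by a closed-form frequency computation: common = sum of min(count in n1, count in n2) over the distinct letters, answer = len1 + len2 - 2*common.
import Mathlib
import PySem

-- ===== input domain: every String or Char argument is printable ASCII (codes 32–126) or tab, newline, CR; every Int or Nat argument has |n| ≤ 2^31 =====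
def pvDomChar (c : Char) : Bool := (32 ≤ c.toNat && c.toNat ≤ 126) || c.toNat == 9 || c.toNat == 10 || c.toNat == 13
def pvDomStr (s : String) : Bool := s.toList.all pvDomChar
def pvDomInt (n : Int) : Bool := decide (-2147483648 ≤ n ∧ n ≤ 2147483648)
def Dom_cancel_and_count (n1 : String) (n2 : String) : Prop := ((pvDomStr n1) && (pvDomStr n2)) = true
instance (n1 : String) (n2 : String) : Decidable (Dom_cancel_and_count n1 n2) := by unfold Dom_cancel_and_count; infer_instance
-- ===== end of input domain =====

-- B replaces A's cancellation loop (membership test + .index + marking + while/remove) by a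
-- frequency formula: len1 + len2 - 2 * Σ_{distinct c} min(count c n1, count c n2); return value only.

-- ===== PORT A =====
-- A overwrites cancelled letters with the int 0; the cell type is modelled as Option Char, 0 = none.

-- 'while 0 in l: l.remove(0)'
def pvRemoveZeros (l : List (Option Char)) : List (Option Char) :=
  if h : none ∈ l then pvRemoveZeros (l.erase none) else l
termination_by l.length
decreasing_by
  have h1 := List.length_erase_of_mem h
  have h2 := List.length_pos_of_mem h
  omega

-- the 'for i in range(len(n1))' loop; n1's cells are read/written only at the current index i,
-- so it is transcribed as structural recursion over n1 with the processed prefix accumulated.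
def pvLoopA : List (Option Char) → List (Option Char) → List (Option Char) → List (Option Char) × List (Option Char)
  | done, [], n2 => (done, n2)
  | done, c :: rest, n2 =>
    if c ∈ n2 ∧ c ≠ none then
      pvLoopA (done ++ [none]) rest
        (match PySem.List.index? n2 c with
         | some j => n2.set j none
         | none => n2)
    else pvLoopA (done ++ [c]) rest n2

def cancel_and_count (n1 : String) (n2 : String) : Int :=
  let a0 := ((PySem.Str.lower n1).toList).map some
  let b0 := ((PySem.Str.lower n2).toList).map some
  let p := if b0.length > a0.length then (b0, a0) else (a0, b0)
  let q := pvLoopA [] p.1 p.2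
  ((pvRemoveZeros q.1).length : Int) + ((pvRemoveZeros q.2).length : Int)

-- ===== PORT B =====
def cancel_and_count_alt (n1 : String) (n2 : String) : Int :=
  let a := (PySem.Str.lower n1).toList
  let b := (PySem.Str.lower n2).toList
  let common := ((PySem.Set.ofList a).map (fun c => min (a.count c) (b.count c))).sum
  (a.length : Int) + (b.length : Int) - 2 * (common : Int)

-- ===== PRECONDITION & SPEC =====
def Spec_cancel_and_count (n1 : String) (n2 : String) (out : Int) : Prop := out = cancel_and_count_alt n1 n2
instance (n1 : String) (n2 : String) (out : Int) : Decidable (Spec_cancel_and_count n1 n2 out) := by unfold Spec_cancel_and_count; infer_instance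

-- ===== CLAIM (what is proved, stated in full; the proofs are below) =====
def Claim_equal_cancel_and_count : Prop := ∀ (n1 : String) (n2 : String), Dom_cancel_and_count n1 n2 → Spec_cancel_and_count n1 n2 (cancel_and_count n1 n2)

-- ===== LEMMAS AND PROOFS =====

-- the surviving (non-cancelled) characters of a cell list
def pvLive (l : List (Option Char)) : List Char := l.filterMap (fun x => x)

-- greedy cancellation, characterising A's loop: residual count of l1 against l2
def pvResidual : List Char → List Char → Nat
  | [], l2 => l2.length
  | c :: r, l2 => if c ∈ l2 then pvResidual r (l2.erase c) else pvResidual r l2 + 1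

theorem pvLive_cons_none (l : List (Option Char)) : pvLive (none :: l) = pvLive l := by
  simp [pvLive]

theorem pvLive_cons_some (b : Char) (l : List (Option Char)) :
    pvLive (some b :: l) = b :: pvLive l := by
  simp [pvLive]

theorem pvLive_append (l t : List (Option Char)) : pvLive (l ++ t) = pvLive l ++ pvLive t := by
  simp [pvLive]

theorem pvLive_erase_none {l : List (Option Char)} (h : none ∈ l) :
    pvLive (l.erase none) = pvLive l := by
  induction l with
  | nil => simp at h
  | cons x t ih =>
    by_cases hx : x = none
    · subst hx; simp [List.erase_cons_head, pvLive_cons_none]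
    · rw [List.erase_cons_tail (by simpa using hx)]
      rcases List.mem_cons.mp h with h' | h'
      · exact absurd h'.symm hx
      · cases x with
        | none => exact absurd rfl hx
        | some b => rw [pvLive_cons_some, pvLive_cons_some, ih h']

theorem pvAllSome {l : List (Option Char)} (h : none ∉ l) : (pvLive l).map some = l := by
  induction l with
  | nil => simp [pvLive]
  | cons x t ih =>
    simp only [List.mem_cons, not_or] at h
    cases x with
    | none => exact absurd rfl h.1
    | some b => rw [pvLive_cons_some, List.map_cons, ih h.2]

theorem pvRemoveZeros_eq (l : List (Option Char)) : pvRemoveZeros l = (pvLive l).map some := by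
  fun_induction pvRemoveZeros l with
  | case1 l h ih => rw [ih, pvLive_erase_none h]
  | case2 l h => exact (pvAllSome h).symm

theorem pvMem_some {a : Char} {l : List (Option Char)} : some a ∈ l ↔ a ∈ pvLive l := by
  simp [pvLive, List.mem_filterMap]

theorem pvLive_set_none {l : List (Option Char)} {a : Char} {j : Nat}
    (h : PySem.List.index? l (some a) = some j) :
    pvLive (l.set j none) = (pvLive l).erase a := by
  induction l generalizing j with
  | nil => rw [PySem.List.index?_eq_idxOf?] at h; simp at h
  | cons x t ih =>
    by_cases hx : x = some a
    · subst hx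
      rw [PySem.List.index?_cons_self] at h
      obtain rfl : (0 : Nat) = j := Option.some.inj h
      rw [List.set_cons_zero, pvLive_cons_none, pvLive_cons_some, List.erase_cons_head]
    · rw [PySem.List.index?_cons_of_ne t hx] at h
      cases hj : PySem.List.index? t (some a) with
      | none => rw [hj] at h; simp at h
      | some j' =>
        rw [hj] at h
        simp only [Option.map_some] at h
        obtain rfl : j' + 1 = j := Option.some.inj h
        rw [List.set_cons_succ]
        cases x with
        | none => rw [pvLive_cons_none, pvLive_cons_none, ih hj]
        | some b =>
          have hba : b ≠ a := fun e => hx (by rw [e])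
          rw [pvLive_cons_some, pvLive_cons_some, ih hj,
            List.erase_cons_tail (by simpa using hba)]

theorem pvLoopA_spec (l : List Char) (done n2 : List (Option Char)) :
    (pvLive (pvLoopA done (l.map some) n2).1).length + (pvLive (pvLoopA done (l.map some) n2).2).length
      = (pvLive done).length + pvResidual l (pvLive n2) := by
  induction l generalizing done n2 with
  | nil => simp [pvLoopA, pvResidual]
  | cons c r ih =>
    simp only [List.map_cons, pvLoopA]
    by_cases hc : c ∈ pvLive n2
    · have hmem : some c ∈ n2 := pvMem_some.mpr hc
      rw [if_pos ⟨hmem, by simp⟩]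
      obtain ⟨j, hj⟩ := Option.isSome_iff_exists.mp ((PySem.List.index?_isSome_iff n2 (some c)).mpr hmem)
      rw [hj, ih]
      rw [pvLive_append, pvLive_cons_none]
      rw [pvLive_set_none hj, pvResidual, if_pos hc]
      simp [pvLive]
    · have hnm : some c ∉ n2 := fun h => hc (pvMem_some.mp h)
      rw [if_neg (by simp [hnm])]
      rw [ih]
      rw [pvLive_append, pvLive_cons_some]
      rw [pvResidual, if_neg hc]
      simp [pvLive]
      omega

theorem pvLive_map_some (l : List Char) : pvLive (l.map some) = l := by
  simp [pvLive, List.filterMap_map]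

-- Multiset characterisation of the greedy residual
theorem pvInter_cons_of_mem {a : Char} {s : Multiset Char} {t : Multiset Char} (h : a ∈ t) :
    (a ::ₘ s) ∩ t = a ::ₘ (s ∩ t.erase a) := by
  ext b
  by_cases hb : b = a
  · subst hb
    have : 1 ≤ t.count b := Multiset.one_le_count_iff_mem.mpr h
    simp [Multiset.count_inter, Multiset.count_cons_self, Multiset.count_erase_self]
    omega
  · simp [Multiset.count_inter, Multiset.count_cons_of_ne hb, Multiset.count_erase_of_ne hb]

theorem pvInter_cons_of_not_mem {a : Char} {s : Multiset Char} {t : Multiset Char} (h : a ∉ t) :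
    (a ::ₘ s) ∩ t = s ∩ t := by
  ext b
  by_cases hb : b = a
  · subst hb
    have : t.count b = 0 := Multiset.count_eq_zero.mpr h
    simp [Multiset.count_inter, Multiset.count_cons_self, this]
  · simp [Multiset.count_inter, Multiset.count_cons_of_ne hb]

theorem pvResidual_add (l1 l2 : List Char) :
    pvResidual l1 l2 + 2 * ((l1 : Multiset Char) ∩ (l2 : Multiset Char)).card
      = l1.length + l2.length := by
  induction l1 generalizing l2 with
  | nil => simp [pvResidual]
  | cons c r ih =>
    by_cases hc : c ∈ l2
    · have hlen : (l2.erase c).length = l2.length - 1 := List.length_erase_of_mem hc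
      have hpos : 1 ≤ l2.length := List.length_pos_of_mem hc
      have hco : ((c :: r : List Char) : Multiset Char) ∩ ↑l2
          = c ::ₘ ((r : Multiset Char) ∩ ((l2.erase c : List Char) : Multiset Char)) := by
        rw [← Multiset.cons_coe, pvInter_cons_of_mem (by exact_mod_cast hc)]
        rw [← Multiset.coe_erase]
      rw [pvResidual, if_pos hc]
      have := ih (l2.erase c)
      rw [hco]
      simp only [Multiset.card_cons, List.length_cons]
      omega
    · have hco : ((c :: r : List Char) : Multiset Char) ∩ ↑l2
          = (r : Multiset Char) ∩ ↑l2 := by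
        rw [← Multiset.cons_coe, pvInter_cons_of_not_mem (by exact_mod_cast hc)]
      rw [pvResidual, if_neg hc, hco]
      have := ih l2
      simp only [List.length_cons]
      omega

theorem pvInter_card_comm (s t : Multiset Char) : (s ∩ t).card = (t ∩ s).card := by
  have : s ∩ t = t ∩ s := by
    ext b; simp [Multiset.count_inter, Nat.min_comm]
  rw [this]

-- B's sum of per-letter minima is the cardinality of the multiset intersection
theorem pvSum_min_counts (a b : List Char) :
    ((PySem.Set.ofList a).map (fun c => min (a.count c) (b.count c))).sum
      = ((a : Multiset Char) ∩ (b : Multiset Char)).card := by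
  have h1 : ((a : Multiset Char) ∩ ↑b).card
      = ∑ x ∈ (a : Multiset Char).toFinset, ((a : Multiset Char) ∩ ↑b).count x := by
    rw [← Multiset.toFinset_sum_count_eq ((a : Multiset Char) ∩ ↑b)]
    refine Finset.sum_subset (fun x hx => ?_) (fun x hx hnx => ?_)
    · simp only [Multiset.mem_toFinset] at hx ⊢
      exact (Multiset.mem_inter.mp hx).1
    · simp only [Multiset.mem_toFinset] at hnx
      exact Multiset.count_eq_zero.mpr hnx
  have h2 : ∀ x : Char, ((a : Multiset Char) ∩ ↑b).count x = min (a.count x) (b.count x) := by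
    intro x; simp
  have h3 : (a : Multiset Char).toFinset = (PySem.Set.ofList a).toFinset := by
    ext x
    simp [List.mem_toFinset, PySem.Set.mem_ofList]
  rw [h1, Finset.sum_congr rfl (fun x _ => h2 x), h3,
    List.sum_toFinset _ (PySem.Set.nodup_ofList a)]

-- ===== VERDICT (by name: the statement is the Claim_ definition above) =====
theorem cancel_and_count_spec : Claim_equal_cancel_and_count := by
  intro n1 n2 _
  unfold Spec_cancel_and_count cancel_and_count cancel_and_count_alt
  set a := (PySem.Str.lower n1).toList with ha
  set b := (PySem.Str.lower n2).toList with hb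
  simp only [List.length_map]
  have key : ∀ x y : List Char,
      ((pvRemoveZeros (pvLoopA [] (x.map some) (y.map some)).1).length : Int)
        + ((pvRemoveZeros (pvLoopA [] (x.map some) (y.map some)).2).length : Int)
      = (x.length : Int) + (y.length : Int)
        - 2 * (((x : Multiset Char) ∩ (y : Multiset Char)).card : Int) := by
    intro x y
    have h := pvLoopA_spec x [] (y.map some)
    rw [pvLive_map_some] at h
    have hres := pvResidual_add x y
    simp only [pvRemoveZeros_eq, List.length_map]
    have hd : (pvLive ([] : List (Option Char))).length = 0 := by simp [pvLive]
    omega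
  by_cases hlen : b.length > a.length
  · rw [if_pos hlen]
    rw [key b a, pvSum_min_counts, pvInter_card_comm]
    omega
  · rw [if_neg hlen]
    rw [key a b, pvSum_min_counts]
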